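-- pv_equiv track=rewrite | github.com/Nutan-31/pcb1 | api/backend.py | validate_and_fix_circuit
-- ===== SOURCE A (Python) =====
-- def validate_and_fix_circuit(circuit_data: dict) -> dict:
--     """Post-process circuit data to fix common mistakes"""
--     if not circuit_data:
--         return circuit_data
--
--     components = circuit_data.get("components", [])
--
--     has_led = any(
--         "LED" in c.get("type", "").upper() or
--         "LED" in c.get("value", "").upper()
--         for c in components
--     )
--
--     has_led_resistor = any(
--         "LED" in c.get("description", "").upper() and
--         c.get("type", "").upper() == "R"
--         for c in components
--     )
--
--     if has_led and not has_led_resistor: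
--         r_nums = [int(c["ref"][1:]) for c in components
--                   if c.get("ref", "").startswith("R") and
--                   c["ref"][1:].isdigit()]
--         next_r = max(r_nums) + 1 if r_nums else 1
--         components.append({
--             "ref": f"R{next_r}",
--             "type": "R",
--             "value": "330R",
--             "description": "LED current limiting resistor"
--         })
--
--     has_ic = any(
--         c.get("type", "").upper() in ["U", "IC"]
--         for c in components
--     )
--
--     has_decoupling = any(
--         "DECOUPL" in c.get("description", "").upper() or
--         "BYPASS" in c.get("description", "").upper()
--         for c in components
--     )
--
--     if has_ic and not has_decoupling:
--         c_nums = [int(c["ref"][1:]) for c in components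
--                   if c.get("ref", "").startswith("C") and
--                   c["ref"][1:].isdigit()]
--         next_c = max(c_nums) + 1 if c_nums else 1
--         components.append({
--             "ref": f"C{next_c}",
--             "type": "C",
--             "value": "100nF",
--             "description": "Decoupling capacitor"
--         })
--
--     circuit_data["components"] = components
--     return circuit_data
-- ===== SOURCE B (Python) =====
-- def validate_and_fix_circuit(circuit_data: dict) -> dict:
--     """Single pass over the components collecting all flags and ref maxima, then the two conditional appends."""
--     if not circuit_data:
--         return circuit_data
--
--     components = circuit_data.get("components", [])
--
--     has_led = has_led_resistor = has_ic = has_decoupling = False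
--     max_r = max_c = None
--     for c in components:
--         t = c.get("type", "").upper()
--         desc = c.get("description", "").upper()
--         if "LED" in t or "LED" in c.get("value", "").upper():
--             has_led = True
--         if "LED" in desc and t == "R":
--             has_led_resistor = True
--         if t in ["U", "IC"]:
--             has_ic = True
--         if "DECOUPL" in desc or "BYPASS" in desc:
--             has_decoupling = True
--         ref = c.get("ref", "")
--         if ref[1:].isdigit():
--             n = int(ref[1:])
--             if ref.startswith("R"):
--                 max_r = n if max_r is None else max(max_r, n)
--             if ref.startswith("C"):
--                 max_c = n if max_c is None else max(max_c, n)
--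
--     if has_led and not has_led_resistor:
--         components.append({
--             "ref": f"R{max_r + 1 if max_r is not None else 1}",
--             "type": "R",
--             "value": "330R",
--             "description": "LED current limiting resistor"
--         })
--
--     if has_ic and not has_decoupling:
--         components.append({
--             "ref": f"C{max_c + 1 if max_c is not None else 1}",
--             "type": "C",
--             "value": "100nF",
--             "description": "Decoupling capacitor"
--         })
--
--     circuit_data["components"] = components
--     return circuit_data
-- ===== Notes on version B (the rewrite author's own statement) =====
-- stated objective: simpler
-- what changed: B replaces A's six separate passes over the components list (four any-scans and two filter/map comprehensions) by one loop that accumulates the four flags and the running R/C reference maxima, then does the two conditional appends.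
import Mathlib
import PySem

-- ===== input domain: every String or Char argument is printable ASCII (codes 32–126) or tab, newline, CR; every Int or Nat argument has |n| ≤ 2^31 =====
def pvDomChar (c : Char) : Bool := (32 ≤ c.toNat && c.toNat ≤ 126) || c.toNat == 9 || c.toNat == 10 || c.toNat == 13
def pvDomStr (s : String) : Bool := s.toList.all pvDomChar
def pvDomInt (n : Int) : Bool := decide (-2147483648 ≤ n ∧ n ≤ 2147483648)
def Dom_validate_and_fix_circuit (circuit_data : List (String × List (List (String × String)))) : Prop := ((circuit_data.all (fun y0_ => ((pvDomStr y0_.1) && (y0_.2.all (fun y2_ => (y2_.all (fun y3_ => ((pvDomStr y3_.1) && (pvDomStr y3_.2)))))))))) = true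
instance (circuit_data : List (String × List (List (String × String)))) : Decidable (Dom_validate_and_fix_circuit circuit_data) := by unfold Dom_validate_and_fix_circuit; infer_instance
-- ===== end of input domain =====

-- B collapses A's six scans of the components list into one accumulating loop; equivalence is about the
-- RETURN value (both Pythons also mutate circuit_data / its components list in place, in the same way).

-- ===== PORT A =====
def validate_and_fix_circuit (circuit_data : List (String × List (List (String × String)))) : List (String × List (List (String × String))) :=
  if circuit_data.isEmpty then circuit_data else
  let components := (PySem.Dict.mk circuit_data).getD "components" []
  let has_led := components.any (fun c =>
      PySem.Str.isIn "LED" (PySem.Str.upper ((PySem.Dict.mk c).getD "type" "")) ||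
      PySem.Str.isIn "LED" (PySem.Str.upper ((PySem.Dict.mk c).getD "value" "")))
  let has_led_resistor := components.any (fun c =>
      PySem.Str.isIn "LED" (PySem.Str.upper ((PySem.Dict.mk c).getD "description" "")) &&
      PySem.Str.upper ((PySem.Dict.mk c).getD "type" "") == "R")
  let components1 :=
    if has_led && !has_led_resistor then
      let r_nums := (components.filter (fun c =>
          PySem.Str.startswith ((PySem.Dict.mk c).getD "ref" "") "R" &&
          PySem.Str.strIsdigit (PySem.Str.slice ((PySem.Dict.mk c).getD "ref" "") (some 1) none))).map
          (fun c => (PySem.Int.ofStr? (PySem.Str.slice ((PySem.Dict.mk c).getD "ref" "") (some 1) none)).getD 0)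
      let next_r := match PySem.List.max? r_nums (fun x => x) with
        | some m => m + 1
        | none => 1
      components ++ [[("ref", "R" ++ PySem.Int.toStr next_r), ("type", "R"), ("value", "330R"), ("description", "LED current limiting resistor")]]
    else components
  let has_ic := components1.any (fun c =>
      ["U", "IC"].contains (PySem.Str.upper ((PySem.Dict.mk c).getD "type" "")))
  let has_decoupling := components1.any (fun c =>
      PySem.Str.isIn "DECOUPL" (PySem.Str.upper ((PySem.Dict.mk c).getD "description" "")) ||
      PySem.Str.isIn "BYPASS" (PySem.Str.upper ((PySem.Dict.mk c).getD "description" "")))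
  let components2 :=
    if has_ic && !has_decoupling then
      let c_nums := (components1.filter (fun c =>
          PySem.Str.startswith ((PySem.Dict.mk c).getD "ref" "") "C" &&
          PySem.Str.strIsdigit (PySem.Str.slice ((PySem.Dict.mk c).getD "ref" "") (some 1) none))).map
          (fun c => (PySem.Int.ofStr? (PySem.Str.slice ((PySem.Dict.mk c).getD "ref" "") (some 1) none)).getD 0)
      let next_c := match PySem.List.max? c_nums (fun x => x) with
        | some m => m + 1
        | none => 1
      components1 ++ [[("ref", "C" ++ PySem.Int.toStr next_c), ("type", "C"), ("value", "100nF"), ("description", "Decoupling capacitor")]]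
    else components1
  ((PySem.Dict.mk circuit_data).insert "components" components2).items

-- ===== PORT B =====
-- the single accumulating loop of Source B (flags and running maxima as explicit accumulators)
def pvLoopB : List (List (String × String)) → Bool → Bool → Bool → Bool → Option Int → Option Int →
    Bool × Bool × Bool × Bool × Option Int × Option Int
  | [], hl, hlr, hic, hd, mr, mc => (hl, hlr, hic, hd, mr, mc)
  | c :: rest, hl, hlr, hic, hd, mr, mc =>
    let t := PySem.Str.upper ((PySem.Dict.mk c).getD "type" "")
    let desc := PySem.Str.upper ((PySem.Dict.mk c).getD "description" "")
    let hl' := hl || (PySem.Str.isIn "LED" t || PySem.Str.isIn "LED" (PySem.Str.upper ((PySem.Dict.mk c).getD "value" "")))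
    let hlr' := hlr || (PySem.Str.isIn "LED" desc && t == "R")
    let hic' := hic || ["U", "IC"].contains t
    let hd' := hd || (PySem.Str.isIn "DECOUPL" desc || PySem.Str.isIn "BYPASS" desc)
    let ref := (PySem.Dict.mk c).getD "ref" ""
    let suf := PySem.Str.slice ref (some 1) none
    let mr' := if PySem.Str.strIsdigit suf && PySem.Str.startswith ref "R" then
        some (match mr with
          | none => (PySem.Int.ofStr? suf).getD 0
          | some m => max m ((PySem.Int.ofStr? suf).getD 0))
      else mr
    let mc' := if PySem.Str.strIsdigit suf && PySem.Str.startswith ref "C" then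
        some (match mc with
          | none => (PySem.Int.ofStr? suf).getD 0
          | some m => max m ((PySem.Int.ofStr? suf).getD 0))
      else mc
    pvLoopB rest hl' hlr' hic' hd' mr' mc'

def validate_and_fix_circuit_alt (circuit_data : List (String × List (List (String × String)))) : List (String × List (List (String × String))) :=
  if circuit_data.isEmpty then circuit_data else
  let components := (PySem.Dict.mk circuit_data).getD "components" []
  let r := pvLoopB components false false false false none none
  let has_led := r.1
  let has_led_resistor := r.2.1
  let has_ic := r.2.2.1
  let has_decoupling := r.2.2.2.1
  let max_r := r.2.2.2.2.1
  let max_c := r.2.2.2.2.2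
  let components1 :=
    if has_led && !has_led_resistor then
      components ++ [[("ref", "R" ++ PySem.Int.toStr (match max_r with | some m => m + 1 | none => 1)), ("type", "R"), ("value", "330R"), ("description", "LED current limiting resistor")]]
    else components
  let components2 :=
    if has_ic && !has_decoupling then
      components1 ++ [[("ref", "C" ++ PySem.Int.toStr (match max_c with | some m => m + 1 | none => 1)), ("type", "C"), ("value", "100nF"), ("description", "Decoupling capacitor")]]
    else components1
  ((PySem.Dict.mk circuit_data).insert "components" components2).items

-- ===== PRECONDITION & SPEC =====
def Spec_validate_and_fix_circuit (circuit_data : List (String × List (List (String × String)))) (out : List (String × List (List (String × String)))) : Prop := out = validate_and_fix_circuit_alt circuit_data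
instance (circuit_data : List (String × List (List (String × String)))) (out : List (String × List (List (String × String)))) : Decidable (Spec_validate_and_fix_circuit circuit_data out) := by unfold Spec_validate_and_fix_circuit; infer_instance

-- ===== CLAIM (what is proved, stated in full; the proofs are below) =====
def Claim_equal_validate_and_fix_circuit : Prop := ∀ (circuit_data : List (String × List (List (String × String)))), Dom_validate_and_fix_circuit circuit_data → Spec_validate_and_fix_circuit circuit_data (validate_and_fix_circuit circuit_data)

-- ===== LEMMAS AND PROOFS =====

-- predicates exactly as in the ports (proof-only helpers)

def pvLed (c : List (String × String)) : Bool :=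
  PySem.Str.isIn "LED" (PySem.Str.upper ((PySem.Dict.mk c).getD "type" "")) ||
  PySem.Str.isIn "LED" (PySem.Str.upper ((PySem.Dict.mk c).getD "value" ""))
def pvLedRes (c : List (String × String)) : Bool :=
  PySem.Str.isIn "LED" (PySem.Str.upper ((PySem.Dict.mk c).getD "description" "")) &&
  PySem.Str.upper ((PySem.Dict.mk c).getD "type" "") == "R"
def pvIc (c : List (String × String)) : Bool :=
  ["U", "IC"].contains (PySem.Str.upper ((PySem.Dict.mk c).getD "type" ""))
def pvDec (c : List (String × String)) : Bool :=
  PySem.Str.isIn "DECOUPL" (PySem.Str.upper ((PySem.Dict.mk c).getD "description" "")) ||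
  PySem.Str.isIn "BYPASS" (PySem.Str.upper ((PySem.Dict.mk c).getD "description" ""))
def pvR (c : List (String × String)) : Bool :=
  PySem.Str.startswith ((PySem.Dict.mk c).getD "ref" "") "R" &&
  PySem.Str.strIsdigit (PySem.Str.slice ((PySem.Dict.mk c).getD "ref" "") (some 1) none)
def pvC (c : List (String × String)) : Bool :=
  PySem.Str.startswith ((PySem.Dict.mk c).getD "ref" "") "C" &&
  PySem.Str.strIsdigit (PySem.Str.slice ((PySem.Dict.mk c).getD "ref" "") (some 1) none)
def pvNum (c : List (String × String)) : Int :=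
  (PySem.Int.ofStr? (PySem.Str.slice ((PySem.Dict.mk c).getD "ref" "") (some 1) none)).getD 0
def pvMaxO (o : Option Int) (xs : List Int) : Option Int :=
  xs.foldl (fun o n => some (match o with | none => n | some m => max m n)) o

theorem pvMaxO_some (xs : List Int) (a : Int) : pvMaxO (some a) xs = some (xs.foldl max a) := by
  induction xs generalizing a with
  | nil => rfl
  | cons x t ih => simp [pvMaxO, List.foldl] at *; exact ih (max a x)

theorem pvMaxO_none (xs : List Int) : pvMaxO none xs = PySem.List.max? xs (fun x => x) := by
  cases xs with
  | nil => rfl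
  | cons x t =>
    have h1 : pvMaxO none (x :: t) = pvMaxO (some x) t := rfl
    rw [h1, pvMaxO_some, PySem.List.max?_id_cons]


theorem sw_cons_RC (l : List Char) : PySem.Chars.startswith ('R' :: l) ['C'] = false := by
  apply Bool.eq_false_iff.mpr
  intro htrue
  rw [PySem.Chars.startswith_iff] at htrue
  have hpre := htrue
  rcases List.cons_prefix_cons.mp hpre with ⟨h1, _⟩
  exact absurd h1 (by decide)

theorem pvIc_rcomp (n : Int) : pvIc [("ref", "R" ++ PySem.Int.toStr n), ("type", "R"), ("value", "330R"), ("description", "LED current limiting resistor")] = false := by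
  simp [pvIc, PySem.Dict.getD_eq_get?_getD, PySem.Dict.get?_mk_cons]
  decide

theorem pvDec_rcomp (n : Int) : pvDec [("ref", "R" ++ PySem.Int.toStr n), ("type", "R"), ("value", "330R"), ("description", "LED current limiting resistor")] = false := by
  simp [pvDec, PySem.Dict.getD_eq_get?_getD, PySem.Dict.get?_mk_cons]
  decide

theorem pvC_rcomp (n : Int) : pvC [("ref", "R" ++ PySem.Int.toStr n), ("type", "R"), ("value", "330R"), ("description", "LED current limiting resistor")] = false := by
  simp [pvC, PySem.Dict.getD_eq_get?_getD, PySem.Dict.get?_mk_cons, sw_cons_RC]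

theorem pvLoopB_spec (l : List (List (String × String))) (hl hlr hic hd : Bool) (mr mc : Option Int) :
    pvLoopB l hl hlr hic hd mr mc =
      (hl || l.any pvLed, hlr || l.any pvLedRes, hic || l.any pvIc, hd || l.any pvDec,
       pvMaxO mr ((l.filter pvR).map pvNum), pvMaxO mc ((l.filter pvC).map pvNum)) := by
  induction l generalizing hl hlr hic hd mr mc with
  | nil => simp [pvLoopB, pvMaxO]
  | cons c rest ih =>
    rw [pvLoopB.eq_def]; simp only []; rw [ih]
    simp only [List.any_cons, List.filter_cons, pvLed, pvLedRes, pvIc, pvDec, pvR, pvC]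
    by_cases h1 : PySem.Chars.strIsdigit (PySem.List.slice ((PySem.Dict.mk c).getD "ref" "").toList (some 1) none) = true <;>
    by_cases h2 : PySem.Chars.startswith ((PySem.Dict.mk c).getD "ref" "").toList ['R'] = true <;>
    by_cases h3 : PySem.Chars.startswith ((PySem.Dict.mk c).getD "ref" "").toList ['C'] = true <;>
      simp [h1, h2, h3, pvMaxO, pvNum, Bool.or_assoc]

-- ===== VERDICT (by name: the statement is the Claim_ definition above) =====
theorem validate_and_fix_circuit_spec : Claim_equal_validate_and_fix_circuit := by
  intro cd _
  unfold Spec_validate_and_fix_circuit validate_and_fix_circuit validate_and_fix_circuit_alt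
  by_cases he : cd.isEmpty
  · simp [he]
  · simp only [he, if_false, Bool.false_eq_true]
    rw [pvLoopB_spec]
    simp only [← pvLed.eq_def, ← pvLedRes.eq_def, ← pvIc.eq_def, ← pvDec.eq_def,
      ← pvR.eq_def, ← pvC.eq_def, ← pvNum.eq_def, pvMaxO_none, Bool.false_or]
    generalize (PySem.Dict.mk cd).getD "components" ([] : List (List (String × String))) = comps
    by_cases h1 : (comps.any pvLed && !comps.any pvLedRes) = true
    · simp [h1, List.any_append, List.any_cons, List.any_nil, List.filter_append, pvIc_rcomp, pvDec_rcomp, pvC_rcomp]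
    · simp [h1]
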